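-- pv_equiv track=rewrite | github.com/rsarwas/aoc | 2024-14/answers.py | is_symmetrical
-- ===== SOURCE A (Python) =====
-- def is_symmetrical(robots, size):
--     """Return True if the locations of the robots are symmetrical about the vertical midline"""
--     max_x, _ = size
--     mid_x = max_x // 2
--     max_x -= 1
--     locations = {}
--     for x, y, _, _ in robots:
--         if y not in locations:
--             locations[y] = []
--         if x < mid_x:
--             locations[y].append(x)
--         else:
--             x = max_x - x
--             locations[y].append(x)
--     errors = 0
--     for y in locations:
--         # if len(locations[y]) == 1:
--         #     if locations[y][0] != mid_x:
--         #         return False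
--         if len(locations[y]) == 2:
--             if locations[y][0] != locations[y][1]:
--                 # return False
--                 errors += 1
--                 if errors > 5:
--                     return False
--     return True
-- ===== SOURCE B (Python) =====
-- def is_symmetrical(robots, size):
--     """Return True if the locations of the robots are symmetrical about the vertical midline"""
--     max_x, _ = size
--     mid_x = max_x // 2
--     base = max_x - 1
--     ys = list(dict.fromkeys(y for _, y, _, _ in robots))
--     errors = 0
--     for y in ys:
--         group = [x if x < mid_x else base - x for x, y2, _, _ in robots if y2 == y]
--         if len(group) == 2 and group[0] != group[1]:
--             errors += 1
--     return errors <= 5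
-- ===== Notes on version B (the rewrite author's own statement) =====
-- stated objective: alternative
-- what changed: Replaces A's single-pass dict-of-lists grouping with early-exit error counting by a dedup of the y-keys followed by a per-key filter scan that materializes each group on demand and a total mismatch count compared to 5 at the end.
import Mathlib
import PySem

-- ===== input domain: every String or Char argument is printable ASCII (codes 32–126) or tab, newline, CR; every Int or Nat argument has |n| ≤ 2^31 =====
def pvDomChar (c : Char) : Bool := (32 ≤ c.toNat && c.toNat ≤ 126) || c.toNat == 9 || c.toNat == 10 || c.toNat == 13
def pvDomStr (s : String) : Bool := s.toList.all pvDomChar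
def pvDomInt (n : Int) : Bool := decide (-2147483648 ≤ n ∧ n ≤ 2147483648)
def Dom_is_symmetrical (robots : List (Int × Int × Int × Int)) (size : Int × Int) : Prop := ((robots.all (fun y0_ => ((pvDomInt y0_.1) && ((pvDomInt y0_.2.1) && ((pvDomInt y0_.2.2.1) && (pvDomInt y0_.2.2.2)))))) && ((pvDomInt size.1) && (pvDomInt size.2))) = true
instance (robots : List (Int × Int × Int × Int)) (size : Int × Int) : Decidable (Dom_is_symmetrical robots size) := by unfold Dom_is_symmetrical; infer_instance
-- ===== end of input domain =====

-- B replaces A's one-pass dict-of-lists grouping with early exit by a dedup of the y-keys plus a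
-- per-key filter scan and a final total-count comparison (objective: alternative, not faster).

-- ===== PORT A =====
-- second loop of A: 'for y in locations: …' with early 'return False' once errors exceeds 5.
-- 'locations[y]' is ported as getD (every iterated y is a key, so no KeyError is reachable);
-- 'locations[y][0]' / '[1]' as pyGetD with default 0 (taken only under length = 2, so in range).
def isSymLoopA (d : PySem.Dict Int (List Int)) : List Int → Int → Bool
  | [], _ => true
  | y :: rest, errors =>
    let l := d.getD y []
    if l.length = 2 then
      if PySem.List.pyGetD l 0 0 ≠ PySem.List.pyGetD l 1 0 then
        if errors + 1 > 5 then false else isSymLoopA d rest (errors + 1)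
      else isSymLoopA d rest errors
    else isSymLoopA d rest errors

def is_symmetrical (robots : List (Int × Int × Int × Int)) (size : Int × Int) : Bool :=
  let max_x0 := size.1
  let mid_x := PySem.Int.floordiv max_x0 2
  let max_x := max_x0 - 1
  -- 'locations[y].append(x)' (key present after the conditional insert) is ported as modify
  let locations : PySem.Dict Int (List Int) :=
    robots.foldl (fun d r =>
      let d' := if d.contains r.2.1 then d else d.insert r.2.1 []
      if r.1 < mid_x then d'.modify r.2.1 [] (fun l => l ++ [r.1])
      else d'.modify r.2.1 [] (fun l => l ++ [max_x - r.1])) PySem.Dict.empty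
  isSymLoopA locations locations.keys 0

-- ===== PORT B =====
def groupB (robots : List (Int × Int × Int × Int)) (mid_x base y : Int) : List Int :=
  (robots.filter (fun r => r.2.1 == y)).map (fun r => if r.1 < mid_x then r.1 else base - r.1)

def is_symmetrical_alt (robots : List (Int × Int × Int × Int)) (size : Int × Int) : Bool :=
  let max_x := size.1
  let mid_x := PySem.Int.floordiv max_x 2
  let base := max_x - 1
  let ys := PySem.List.dedup (robots.map (fun r => r.2.1))
  let errors : Int := ys.foldl (fun e y =>
    let g := groupB robots mid_x base y
    if g.length = 2 ∧ PySem.List.pyGetD g 0 0 ≠ PySem.List.pyGetD g 1 0 then e + 1 else e) 0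
  decide (errors ≤ 5)

-- ===== PRECONDITION & SPEC =====
def Spec_is_symmetrical (robots : List (Int × Int × Int × Int)) (size : Int × Int) (out : Bool) : Prop := out = is_symmetrical_alt robots size
instance (robots : List (Int × Int × Int × Int)) (size : Int × Int) (out : Bool) : Decidable (Spec_is_symmetrical robots size out) := by unfold Spec_is_symmetrical; infer_instance

-- ===== CLAIM (what is proved, stated in full; the proofs are below) =====
def Claim_equal_is_symmetrical : Prop := ∀ (robots : List (Int × Int × Int × Int)) (size : Int × Int), Dom_is_symmetrical robots size → Spec_is_symmetrical robots size (is_symmetrical robots size)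

-- ===== LEMMAS AND PROOFS =====

-- A's conditional '[] if missing' insert followed by an append is exactly modify with default []
theorem step_insert_modify (d : PySem.Dict Int (List Int)) (k : Int) (f : List Int → List Int) :
    (if d.contains k then d else d.insert k []).modify k [] f = d.modify k [] f := by
  by_cases h : d.contains k
  · simp [h]
  · have hf : d.contains k = false := by simpa using h
    have hk : ∀ p ∈ d.items, p.1 ≠ k := by
      intro p hp he
      exact h (by
        rw [PySem.Dict.contains_iff_mem_keys]
        exact he ▸ PySem.Dict.mem_keys_of_mem_items (d := d) hp)
    have hins : PySem.Dict.mk (d.items ++ [(k, ([] : List Int))]) = d.insert k [] := by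
      apply PySem.Dict.ext
      rw [PySem.Dict.items_insert_of_not_contains d ([] : List Int) hf]
    have hgd2 : d.getD k [] = ([] : List Int) := PySem.Dict.getD_of_not_contains d [] hf
    simp only [h]
    simp only [PySem.Dict.modify, PySem.Dict.insert, hf]
    simp only [Bool.false_eq_true, if_false, hins, PySem.Dict.contains_insert_self, if_true,
      PySem.Dict.getD_insert_self, PySem.Dict.items_insert_of_not_contains d ([] : List Int) hf,
      hgd2]
    apply PySem.Dict.ext
    simp only [List.map_append, List.map_cons, List.map_nil, beq_self_eq_true, if_true]
    congr 1
    conv_rhs => rw [← List.map_id d.items]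
    refine List.map_congr_left (fun p hp => ?_)
    simp [hk p hp]

-- the error count of B's fold never decreases below its start
theorem foldB_mono (gf : Int → List Int) (ys : List Int) :
    ∀ e : Int, e ≤ ys.foldl (fun e y =>
      if (gf y).length = 2 ∧ PySem.List.pyGetD (gf y) 0 0 ≠ PySem.List.pyGetD (gf y) 1 0
      then e + 1 else e) e := by
  induction ys with
  | nil => intro e; simp
  | cons y rest ih =>
    intro e
    simp only [List.foldl_cons]
    split_ifs
    · exact le_trans (by omega) (ih (e + 1))
    · exact ih e

-- A's early-exit error loop equals B's total count compared with 5
theorem loopA_eq_foldB (d : PySem.Dict Int (List Int)) (gf : Int → List Int)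
    (hg : ∀ y, d.getD y [] = gf y) (ys : List Int) :
    ∀ e : Int, e ≤ 5 → isSymLoopA d ys e =
      decide (ys.foldl (fun e y =>
        if (gf y).length = 2 ∧ PySem.List.pyGetD (gf y) 0 0 ≠ PySem.List.pyGetD (gf y) 1 0
        then e + 1 else e) e ≤ 5) := by
  induction ys with
  | nil => intro e he; simp [isSymLoopA, he]
  | cons y rest ih =>
    intro e he
    simp only [isSymLoopA, hg y, List.foldl_cons]
    by_cases hcond : (gf y).length = 2 ∧
        PySem.List.pyGetD (gf y) 0 0 ≠ PySem.List.pyGetD (gf y) 1 0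
    · rw [if_pos hcond.1, if_pos hcond.2]
      simp only [if_pos hcond]
      by_cases hbig : e + 1 > 5
      · have h6 : (6 : Int) ≤ rest.foldl (fun e y =>
            if (gf y).length = 2 ∧ PySem.List.pyGetD (gf y) 0 0 ≠ PySem.List.pyGetD (gf y) 1 0
            then e + 1 else e) (e + 1) := le_trans (by omega) (foldB_mono gf rest (e + 1))
        rw [if_pos hbig, eq_comm, decide_eq_false_iff_not]
        omega
      · rw [if_neg hbig, ih (e + 1) (by omega)]
    · simp only [if_neg hcond]
      by_cases h2 : (gf y).length = 2
      · rw [if_pos h2, if_neg (by tauto), ih e he]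
      · rw [if_neg h2, ih e he]

-- the value A's dict holds at y is B's group for y
theorem dictA_getD (robots : List (Int × Int × Int × Int)) (mid_x base y : Int) :
    (robots.foldl (fun d r =>
        let d' := if d.contains r.2.1 then d else d.insert r.2.1 []
        if r.1 < mid_x then d'.modify r.2.1 [] (fun l => l ++ [r.1])
        else d'.modify r.2.1 [] (fun l => l ++ [base - r.1])) PySem.Dict.empty).getD y []
      = groupB robots mid_x base y := by
  have hstep : (fun (d : PySem.Dict Int (List Int)) (r : Int × Int × Int × Int) =>
      let d' := if d.contains r.2.1 then d else d.insert r.2.1 []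
      if r.1 < mid_x then d'.modify r.2.1 [] (fun l => l ++ [r.1])
      else d'.modify r.2.1 [] (fun l => l ++ [base - r.1]))
      = fun d r => d.modify r.2.1 [] (fun l => l ++ [if r.1 < mid_x then r.1 else base - r.1]) := by
    funext d r
    by_cases h : r.1 < mid_x <;> simp only [h, if_true, if_false, step_insert_modify]
  rw [hstep]
  have hmap : (robots.foldl
      (fun d r => d.modify r.2.1 [] (fun l => l ++ [if r.1 < mid_x then r.1 else base - r.1]))
      PySem.Dict.empty)
      = ((robots.map (fun r => (r.2.1, if r.1 < mid_x then r.1 else base - r.1))).foldl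
          (fun d p => d.modify p.1 [] (fun l => l ++ [p.2])) PySem.Dict.empty) := by
    rw [List.foldl_map]
  rw [hmap, PySem.Dict.getD_foldl_modify_append]
  simp [groupB, List.filter_map, Function.comp_def]

-- the keys of A's dict are B's deduplicated y list
theorem dictA_keys (robots : List (Int × Int × Int × Int)) (mid_x base : Int) :
    (robots.foldl (fun d r =>
        let d' := if d.contains r.2.1 then d else d.insert r.2.1 []
        if r.1 < mid_x then d'.modify r.2.1 [] (fun l => l ++ [r.1])
        else d'.modify r.2.1 [] (fun l => l ++ [base - r.1])) PySem.Dict.empty).keys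
      = PySem.List.dedup (robots.map (fun r => r.2.1)) := by
  have hstep : (fun (d : PySem.Dict Int (List Int)) (r : Int × Int × Int × Int) =>
      let d' := if d.contains r.2.1 then d else d.insert r.2.1 []
      if r.1 < mid_x then d'.modify r.2.1 [] (fun l => l ++ [r.1])
      else d'.modify r.2.1 [] (fun l => l ++ [base - r.1]))
      = fun d r => d.modify r.2.1 [] ((fun (_ : PySem.Dict Int (List Int))
          (r : Int × Int × Int × Int) (l : List Int) =>
            l ++ [if r.1 < mid_x then r.1 else base - r.1]) d r) := by
    funext d r
    by_cases h : r.1 < mid_x <;> simp only [h, if_true, if_false, step_insert_modify]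
  rw [hstep, PySem.Dict.keys_foldl_modify_key]
  simp [PySem.List.dedup_eq_ofList, PySem.Set.ofList, PySem.Set.update, PySem.Dict.keys,
    PySem.Dict.empty]

-- ===== VERDICT (by name: the statement is the Claim_ definition above) =====
theorem is_symmetrical_spec : Claim_equal_is_symmetrical := by
  intro robots size _
  unfold Spec_is_symmetrical is_symmetrical is_symmetrical_alt
  simp only
  rw [dictA_keys robots (PySem.Int.floordiv size.1 2) (size.1 - 1),
    loopA_eq_foldB _ (groupB robots (PySem.Int.floordiv size.1 2) (size.1 - 1))
      (fun y => dictA_getD robots (PySem.Int.floordiv size.1 2) (size.1 - 1) y) _ 0 (by omega)]
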